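-- pv_equiv track=rewrite | github.com/NetoPedro/RNAFoldingDeepRL | arc_diagram.py | phrantheses_to_pairing_list
-- ===== SOURCE A (Python) =====
-- def phrantheses_to_pairing_list(str, self_loop='same'):
-- 	N = len(str)
-- 	pairing = [0] * N
-- 	stack = []
-- 	for (i, s) in enumerate(str):
-- 		if s == ')':
-- 			j = stack[-1]
-- 			stack = stack[:-1]
-- 			pairing[i] = j
-- 			pairing[j] = i
-- 		elif s == '(':
-- 			stack.append(i)
-- 		else:
-- 			sl_val = -1 if self_loop=='-1' else i
-- 			pairing[i] = sl_val
-- 	return list(pairing)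
-- ===== SOURCE B (Python) =====
-- def phrantheses_to_pairing_list(str, self_loop='same'):
--     # Match parentheses by nesting depth: bucket the positions of '(' and ')'
--     # per depth in one pass, then pair the q-th open with the q-th close of
--     # each depth bucket (for a prefix-balanced string, opens and closes at a
--     # given depth strictly alternate, so this zip is exactly the matching).
--     opens = {}
--     closes = {}
--     res = []
--     d = 0
--     for i, s in enumerate(str):
--         if s == '(':
--             opens.setdefault(d, []).append(i)
--             d += 1
--             res.append(0)
--         elif s == ')':
--             d -= 1
--             closes.setdefault(d, []).append(i)
--             res.append(0)
--         else:
--             res.append(-1 if self_loop == '-1' else i)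
--     for dep, os in opens.items():
--         cs = closes.get(dep, [])
--         for o, c in zip(os, cs):
--             res[o] = c
--             res[c] = o
--     return res
-- ===== Notes on version B (the rewrite author's own statement) =====
-- stated objective: alternative
-- what changed: B abandons A's stack-matching entirely: it buckets the positions of '(' and ')' by nesting depth in one counting pass, then pairs the q-th open with the q-th close of each depth bucket (at a fixed depth opens and closes strictly alternate), writing the result in a second pass; A instead matches each ')' against a stack it re-copies by slicing at every close.
import Mathlib
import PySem

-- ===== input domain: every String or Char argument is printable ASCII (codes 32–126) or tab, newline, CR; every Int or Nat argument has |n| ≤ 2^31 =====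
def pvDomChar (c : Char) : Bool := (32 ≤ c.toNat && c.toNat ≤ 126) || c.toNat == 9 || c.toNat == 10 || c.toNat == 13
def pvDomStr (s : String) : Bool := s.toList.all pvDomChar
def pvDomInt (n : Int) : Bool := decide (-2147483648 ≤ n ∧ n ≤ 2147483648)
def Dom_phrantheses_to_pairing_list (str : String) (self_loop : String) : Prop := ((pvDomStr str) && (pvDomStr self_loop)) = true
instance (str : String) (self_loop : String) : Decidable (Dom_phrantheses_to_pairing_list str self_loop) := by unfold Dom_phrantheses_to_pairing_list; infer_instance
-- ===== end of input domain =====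

-- B replaces A's stack matching by a different algorithm: one pass bucketing the positions
-- of '(' and ')' by nesting depth, then pairing the q-th open with the q-th close of each
-- depth bucket in a second pass.

-- ===== PORT A =====
-- one loop step of A; writes go through List.set at i.toNat / j.toNat, exact because in A
-- the written indices always satisfy 0 ≤ j < i < len(str); stack[-1] is pyGet?, whose
-- `none` case (Python IndexError on an unmatched ')') is excluded by Pre_ below.
def pvAStep (sl : String) (st : List Int × List Int) (p : Int × Char) : List Int × List Int :=
  if p.2 = ')' then
    let j := (PySem.List.pyGet? st.2 (-1)).getD 0
    (((st.1.set p.1.toNat j).set j.toNat p.1), PySem.List.slice st.2 none (some (-1)))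
  else if p.2 = '(' then (st.1, st.2 ++ [p.1])
  else
    (st.1.set p.1.toNat (if sl = "-1" then (-1 : Int) else p.1), st.2)

def phrantheses_to_pairing_list (str : String) (self_loop : String) : List Int :=
  ((PySem.List.enumerate str.toList 0).foldl (pvAStep self_loop)
      (List.replicate str.toList.length 0, [])).1

-- ===== PORT B =====
-- one step of B's first pass over enumerate(str); state = (d, opens, closes, res);
-- `opens.setdefault(d, []).append(i)` is Dict.modify d [] (· ++ [i]).
def pvBStep (sl : String)
    (st : Int × PySem.Dict Int (List Int) × PySem.Dict Int (List Int) × List Int)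
    (p : Int × Char) :
    Int × PySem.Dict Int (List Int) × PySem.Dict Int (List Int) × List Int :=
  if p.2 = '(' then
    (st.1 + 1, st.2.1.modify st.1 [] (· ++ [p.1]), st.2.2.1, st.2.2.2 ++ [0])
  else if p.2 = ')' then
    (st.1 - 1, st.2.1, st.2.2.1.modify (st.1 - 1) [] (· ++ [p.1]), st.2.2.2 ++ [0])
  else
    (st.1, st.2.1, st.2.2.1, st.2.2.2 ++ [if sl = "-1" then (-1 : Int) else p.1])

-- res[o] = c; res[c] = o  (the bucketed indices are always nonnegative and in range)
def pvSetPair (r : List Int) (oc : Int × Int) : List Int :=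
  (r.set oc.1.toNat oc.2).set oc.2.toNat oc.1

def phrantheses_to_pairing_list_alt (str : String) (self_loop : String) : List Int :=
  let s := (PySem.List.enumerate str.toList 0).foldl (pvBStep self_loop)
      (0, PySem.Dict.empty, PySem.Dict.empty, [])
  s.2.1.items.foldl
    (fun r it => (it.2.zip (s.2.2.1.getD it.1 [])).foldl pvSetPair r) s.2.2.2

-- ===== PRECONDITION & SPEC =====
-- Pre_ excludes exactly the strings with an unmatched ')' (some prefix containing more
-- ')' than '('): there Python A raises IndexError on stack[-1].
def Pre_phrantheses_to_pairing_list (str : String) (self_loop : String) : Prop :=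
  ∀ n < str.toList.length + 1,
    (str.toList.take n).count ')' ≤ (str.toList.take n).count '('
instance (str : String) (self_loop : String) : Decidable (Pre_phrantheses_to_pairing_list str self_loop) := by
  unfold Pre_phrantheses_to_pairing_list; infer_instance

def pvWitness_phrantheses_to_pairing_list : String × String := ("(())().x", "same")

def Spec_phrantheses_to_pairing_list (str : String) (self_loop : String) (out : List Int) : Prop := out = phrantheses_to_pairing_list_alt str self_loop
instance (str : String) (self_loop : String) (out : List Int) : Decidable (Spec_phrantheses_to_pairing_list str self_loop out) := by unfold Spec_phrantheses_to_pairing_list; infer_instance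

-- ===== CLAIM (what is proved, stated in full; the proofs are below) =====
def Claim_equal_phrantheses_to_pairing_list : Prop := ∀ (str : String) (self_loop : String), Dom_phrantheses_to_pairing_list str self_loop → Pre_phrantheses_to_pairing_list str self_loop → Spec_phrantheses_to_pairing_list str self_loop (phrantheses_to_pairing_list str self_loop)


-- ===== LEMMAS AND PROOFS =====

-- proof-only vocabulary: the list of matched pairs held by B's buckets, a pair-lookup,
-- the positions touched by the pairs, and B's second pass as a fold over the pair list
def pvPairsB (KO : Nat) (O C : PySem.Dict Int (List Int)) : List (Int × Int) :=
  (List.range KO).flatMap (fun dep : Nat => (O.getD (dep : Int) []).zip (C.getD (dep : Int) []))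

def pvPartner (ps : List (Int × Int)) (m : Int) : Option Int :=
  ps.findSome? (fun oc => if oc.1 = m then some oc.2 else if oc.2 = m then some oc.1 else none)

def pvPos (ps : List (Int × Int)) : List Int := ps.flatMap (fun oc => [oc.1, oc.2])

def pvApply (ps : List (Int × Int)) (r : List Int) : List Int := ps.foldl pvSetPair r

theorem pv_getElem!_set_ne (p : List Int) (i m : Nat) (v : Int) (h : i ≠ m) :
    (p.set i v)[m]! = p[m]! := by
  simp [List.getElem!_eq_getElem?_getD, List.getElem?_set_ne h]

theorem pv_getElem!_set_self (p : List Int) (m : Nat) (v : Int) (h : m < p.length) :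
    (p.set m v)[m]! = v := by
  simp [h]

theorem pv_getElem!_append_lt (r t : List Int) (m : Nat) (h : m < r.length) :
    (r ++ t)[m]! = r[m]! := by
  simp [List.getElem!_eq_getElem?_getD, List.getElem?_append_left h]

theorem pv_getElem!_append_self (r : List Int) (v : Int) :
    (r ++ [v])[r.length]! = v := by
  simp [List.getElem!_eq_getElem?_getD]

theorem pv_length_pvApply (ps : List (Int × Int)) : ∀ r : List Int,
    (pvApply ps r).length = r.length := by
  induction ps with
  | nil => intro r; rfl
  | cons oc t ih =>
    intro r
    simp only [pvApply, List.foldl_cons] at *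
    rw [ih]
    simp [pvSetPair]

theorem pv_mem_pvPos_of_mem {ps : List (Int × Int)} {oc : Int × Int} (h : oc ∈ ps) :
    oc.1 ∈ pvPos ps ∧ oc.2 ∈ pvPos ps := by
  constructor <;> · simp only [pvPos, List.mem_flatMap]; exact ⟨oc, h, by simp⟩

theorem pv_exists_of_mem_pvPos {ps : List (Int × Int)} {m : Int} (h : m ∈ pvPos ps) :
    ∃ oc ∈ ps, m = oc.1 ∨ m = oc.2 := by
  simp only [pvPos, List.mem_flatMap] at h
  obtain ⟨oc, hoc, hm⟩ := h
  simp at hm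
  exact ⟨oc, hoc, hm⟩

theorem pvPartner_eq_none {ps : List (Int × Int)} {m : Int} (h : m ∉ pvPos ps) :
    pvPartner ps m = none := by
  induction ps with
  | nil => rfl
  | cons oc t ih =>
    have h1 : oc.1 ≠ m := by
      intro he; exact h (by simp [pvPos, he.symm])
    have h2 : oc.2 ≠ m := by
      intro he; exact h (by simp [pvPos, he.symm])
    have ht : m ∉ pvPos t := by
      intro hm; exact h (by simp only [pvPos, List.flatMap_cons]; simp [pvPos] at hm ⊢; right; right; exact hm)
    simp [pvPartner, List.findSome?, h1, h2] at *
    exact ih ht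

theorem pvPartner_fst_of_mem {ps : List (Int × Int)} {oc : Int × Int}
    (hnd : (pvPos ps).Nodup) (h : oc ∈ ps) : pvPartner ps oc.1 = some oc.2 := by
  induction ps with
  | nil => simp at h
  | cons hd t ih =>
    have hpos : pvPos (hd :: t) = hd.1 :: hd.2 :: pvPos t := by simp [pvPos]
    rw [hpos] at hnd
    rcases List.mem_cons.mp h with he | ht
    · subst he
      simp [pvPartner, List.findSome?]
    · have h1 : hd.1 ≠ oc.1 := by
        intro he
        exact (List.nodup_cons.mp hnd).1 (by rw [he]; exact List.mem_cons_of_mem _ (pv_mem_pvPos_of_mem ht).1)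
      have h2 : hd.2 ≠ oc.1 := by
        intro he
        exact (List.nodup_cons.mp (List.nodup_cons.mp hnd).2).1 (by rw [he]; exact (pv_mem_pvPos_of_mem ht).1)
      simp only [pvPartner, List.findSome?, h1, h2, if_false] at *
      exact ih (List.nodup_cons.mp (List.nodup_cons.mp hnd).2).2 ht

theorem pvPartner_snd_of_mem {ps : List (Int × Int)} {oc : Int × Int}
    (hnd : (pvPos ps).Nodup) (h : oc ∈ ps) (hne : oc.1 ≠ oc.2) : pvPartner ps oc.2 = some oc.1 := by
  induction ps with
  | nil => simp at h
  | cons hd t ih =>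
    have hpos : pvPos (hd :: t) = hd.1 :: hd.2 :: pvPos t := by simp [pvPos]
    rw [hpos] at hnd
    rcases List.mem_cons.mp h with he | ht
    · subst he
      simp [pvPartner, List.findSome?, hne]
    · have h1 : hd.1 ≠ oc.2 := by
        intro he
        exact (List.nodup_cons.mp hnd).1 (by rw [he]; exact List.mem_cons_of_mem _ (pv_mem_pvPos_of_mem ht).2)
      have h2 : hd.2 ≠ oc.2 := by
        intro he
        exact (List.nodup_cons.mp (List.nodup_cons.mp hnd).2).1 (by rw [he]; exact (pv_mem_pvPos_of_mem ht).2)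
      simp only [pvPartner, List.findSome?, h1, h2, if_false] at *
      exact ih (List.nodup_cons.mp (List.nodup_cons.mp hnd).2).2 ht

theorem pvApply_getElem (ps : List (Int × Int)) : ∀ (r : List Int),
    (pvPos ps).Nodup →
    (∀ oc ∈ ps, 0 ≤ oc.1 ∧ oc.1 < oc.2 ∧ oc.2 < (r.length : Int)) →
    ∀ m : Nat, m < r.length →
    (pvApply ps r)[m]! = (pvPartner ps (m : Int)).getD r[m]! := by
  induction ps with
  | nil => intro r _ _ m _; simp [pvApply, pvPartner, List.findSome?]
  | cons oc t ih =>
    intro r hnd hgood m hm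
    have hpos : pvPos (oc :: t) = oc.1 :: oc.2 :: pvPos t := by simp [pvPos]
    rw [hpos] at hnd
    obtain ⟨ho0, hoc, hc⟩ := hgood oc (List.mem_cons_self)
    have hndt : (pvPos t).Nodup := (List.nodup_cons.mp (List.nodup_cons.mp hnd).2).2
    have r'def : pvApply (oc :: t) r = pvApply t (pvSetPair r oc) := by
      simp [pvApply]
    have hlen' : (pvSetPair r oc).length = r.length := by simp [pvSetPair]
    have hgt : ∀ p ∈ t, 0 ≤ p.1 ∧ p.1 < p.2 ∧ p.2 < ((pvSetPair r oc).length : Int) := by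
      intro p hp; rw [hlen']; exact hgood p (List.mem_cons_of_mem _ hp)
    rw [r'def, ih _ hndt hgt m (by omega)]
    by_cases h1 : oc.1 = (m : Int)
    · have hp1 : pvPartner (oc :: t) (m : Int) = some oc.2 := by
        simp [pvPartner, List.findSome?, h1]
      have hnm : (m : Int) ∉ pvPos t := by
        rw [← h1]; intro hh
        exact (List.nodup_cons.mp hnd).1 (List.mem_cons_of_mem _ hh)
      rw [pvPartner_eq_none hnm, hp1]
      have hmo : oc.1.toNat = m := by omega
      have hcm : oc.2.toNat ≠ m := by omega
      simp only [pvSetPair, Option.getD_some, Option.getD_none]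
      rw [pv_getElem!_set_ne _ _ _ _ hcm, ← hmo, pv_getElem!_set_self _ _ _ (by omega)]
    · by_cases h2 : oc.2 = (m : Int)
      · have hp1 : pvPartner (oc :: t) (m : Int) = some oc.1 := by
          simp [pvPartner, List.findSome?, h1, h2]
        have hnm : (m : Int) ∉ pvPos t := by
          rw [← h2]; exact (List.nodup_cons.mp (List.nodup_cons.mp hnd).2).1
        rw [pvPartner_eq_none hnm, hp1]
        have hcm : oc.2.toNat = m := by omega
        simp only [pvSetPair, Option.getD_some, Option.getD_none]
        rw [← hcm, pv_getElem!_set_self _ _ _ (by simp; omega)]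
      · have hp1 : pvPartner (oc :: t) (m : Int) = pvPartner t (m : Int) := by
          simp [pvPartner, List.findSome?, h1, h2]
        rw [hp1]
        have hr' : (pvSetPair r oc)[m]! = r[m]! := by
          simp only [pvSetPair]
          rw [pv_getElem!_set_ne _ _ _ _ (by omega), pv_getElem!_set_ne _ _ _ _ (by omega)]
        rw [hr']

theorem pv_zip_append_right (cs : List Int) : ∀ (os t : List Int),
    cs.length ≤ os.length → (os ++ t).zip cs = os.zip cs := by
  induction cs with
  | nil => intro os t _; simp
  | cons c cs ih =>
    intro os t h
    cases os with
    | nil => simp at h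
    | cons o os => simp only [List.cons_append, List.zip_cons_cons]
                   rw [ih os t (by simpa using h)]

theorem pv_zip_snoc (os cs : List Int) (x j : Int)
    (h : os.length = cs.length + 1) (hl : os.getLast? = some j) :
    os.zip (cs ++ [x]) = os.zip cs ++ [(j, x)] := by
  have hne : os ≠ [] := by intro he; subst he; simp at h
  have hdec : os.dropLast ++ [os.getLast hne] = os := List.dropLast_concat_getLast hne
  have hj : os.getLast hne = j := by
    have h2 : os.getLast? = some (os.getLast hne) := List.getLast?_eq_some_getLast hne
    rw [h2] at hl; exact Option.some.inj hl
  have hlen : os.dropLast.length = cs.length := by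
    have h3 : os.dropLast.length = os.length - 1 := List.length_dropLast
    omega
  conv_lhs => rw [← hdec]
  rw [List.zip_append hlen, hj, ← pv_zip_append_right cs os.dropLast [os.getLast hne] (by omega)]
  rw [hdec]
  simp

theorem pv_flatMap_update_perm {α : Type} (x : α) (f g : Nat → List α) :
    ∀ (l : List Nat) (dep : Nat), l.Nodup → dep ∈ l →
    (∀ a ∈ l, a ≠ dep → g a = f a) → g dep = f dep ++ [x] →
    (l.flatMap g).Perm (l.flatMap f ++ [x]) := by
  intro l
  induction l with
  | nil => intro dep _ h; simp at h
  | cons a t ih =>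
    intro dep hnd hdep hag hd
    simp only [List.flatMap_cons]
    rcases List.mem_cons.mp hdep with he | ht
    · subst he
      have hgt : t.flatMap g = t.flatMap f := by
        apply List.flatMap_congr
        intro b hb
        exact hag b (List.mem_cons_of_mem _ hb) (by rintro rfl; exact (List.nodup_cons.mp hnd).1 hb)
      rw [hd, hgt]
      simpa [List.append_assoc] using
        List.Perm.append_left (f dep) (List.perm_append_comm (l₁ := [x]) (l₂ := t.flatMap f))
    · have ha : g a = f a := hag a List.mem_cons_self (by rintro rfl; exact (List.nodup_cons.mp hnd).1 ht)
      rw [ha]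
      have hper := ih dep (List.nodup_cons.mp hnd).2 ht
        (fun b hb hne => hag b (List.mem_cons_of_mem _ hb) hne) hd
      simpa [List.append_assoc] using List.Perm.append_left (f a) hper


theorem pv_list_eq_of_getElem! (a b : List Int) (h : a.length = b.length)
    (he : ∀ m : Nat, m < b.length → a[m]! = b[m]!) : a = b := by
  apply List.ext_getElem h
  intro m h1 h2
  have := he m h2
  rwa [getElem!_pos a m (by omega), getElem!_pos b m h2] at this

-- Main invariant: processing the suffix `l` (positions k, k+1, ...) from related states,
-- A's (array, stack) fold and B's (depth, opens, closes, res) fold stay related: opens'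
-- keys are exactly the depths 0..KO'-1, and A's array equals B's second pass (pvApply of
-- the per-depth zips) applied to B's res list.
theorem pv_main (sl : String) (l : List Char) : ∀ (k KO : Nat) (p st r : List Int)
    (O C : PySem.Dict Int (List Int)),
    p.length = k + l.length →
    r.length = k →
    O.keys = (List.range KO).map (fun n : Nat => (n : Int)) →
    st.length ≤ KO →
    (∀ dep : Nat, dep < st.length →
      (C.getD (dep : Int) []).length + 1 = (O.getD (dep : Int) []).length ∧
      (O.getD (dep : Int) []).getLast? = some st[dep]!) →
    (∀ dep : Nat, st.length ≤ dep →
      (O.getD (dep : Int) []).length = (C.getD (dep : Int) []).length) →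
    st.Pairwise (· < ·) →
    (∀ j ∈ st, 0 ≤ j ∧ j < (k : Int)) →
    (∀ oc ∈ pvPairsB KO O C, 0 ≤ oc.1 ∧ oc.1 < oc.2 ∧ oc.2 < (k : Int)) →
    (pvPos (pvPairsB KO O C)).Nodup →
    (∀ oc ∈ pvPairsB KO O C, oc.1 ∉ st ∧ oc.2 ∉ st) →
    (∀ n : Nat, (l.take n).count ')' ≤ st.length + (l.take n).count '(') →
    (∀ m : Nat, m < p.length →
      p[m]! = (pvPartner (pvPairsB KO O C) (m : Int)).getD (if m < k then r[m]! else 0)) →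
    ∃ KO' : Nat,
      ((PySem.List.enumerate l (k : Int)).foldl (pvBStep sl) ((st.length : Int), O, C, r)).2.1.keys
        = (List.range KO').map (fun n : Nat => (n : Int)) ∧
      ((PySem.List.enumerate l (k : Int)).foldl (pvAStep sl) (p, st)).1
        = pvApply
            (pvPairsB KO'
              ((PySem.List.enumerate l (k : Int)).foldl (pvBStep sl) ((st.length : Int), O, C, r)).2.1
              ((PySem.List.enumerate l (k : Int)).foldl (pvBStep sl) ((st.length : Int), O, C, r)).2.2.1)
            ((PySem.List.enumerate l (k : Int)).foldl (pvBStep sl) ((st.length : Int), O, C, r)).2.2.2 := by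
  induction l with
  | nil =>
    intro k KO p st r O C hlen hrlen hkeys hKO h4 h5 hsort hstack h6 h7 h8 hbal h10
    refine ⟨KO, by simpa using hkeys, ?_⟩
    simp only [PySem.List.enumerate_nil, List.foldl_nil]
    have hplen : p.length = k := by simpa using hlen
    have hgood : ∀ oc ∈ pvPairsB KO O C, 0 ≤ oc.1 ∧ oc.1 < oc.2 ∧ oc.2 < (r.length : Int) := by
      rw [hrlen]; exact h6
    apply pv_list_eq_of_getElem!
    · rw [pv_length_pvApply, hplen, hrlen]
    · intro m hm
      rw [pv_length_pvApply, hrlen] at hm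
      rw [pvApply_getElem _ _ h7 hgood m (by omega)]
      have := h10 m (by omega)
      rwa [if_pos (by omega)] at this
  | cons c l ih =>
    intro k KO p st r O C hlen hrlen hkeys hKO h4 h5 hsort hstack h6 h7 h8 hbal h10
    simp only [PySem.List.enumerate_cons, List.foldl_cons]
    rw [show (k : Int) + 1 = ((k + 1 : Nat) : Int) by push_cast; ring]
    have hplen : p.length = k + (l.length + 1) := by simpa using hlen
    have hposlt : ∀ x ∈ pvPos (pvPairsB KO O C), 0 ≤ x ∧ x < (k : Int) := by
      intro x hx
      obtain ⟨oc, hoc, hx2⟩ := pv_exists_of_mem_pvPos hx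
      have := h6 oc hoc
      rcases hx2 with rfl | rfl
      · exact ⟨this.1, by omega⟩
      · exact ⟨by omega, this.2.2⟩
    by_cases hc1 : c = ')'
    · -- current character is ')'
      subst hc1
      have hstne : st ≠ [] := by
        intro h; subst h; have := hbal 1; simp at this
      have hstlen : 0 < st.length := List.length_pos_iff.mpr hstne
      have hdec : st.dropLast ++ [st.getLast hstne] = st := List.dropLast_concat_getLast hstne
      set j := st.getLast hstne with hjdef
      have hjmem : j ∈ st := List.getLast_mem hstne
      obtain ⟨hj0, hjk⟩ := hstack j hjmem
      have hjt : ((j.toNat : Nat) : Int) = j := Int.toNat_of_nonneg hj0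
      have hkp : k < p.length := by omega
      have hjp : j.toNat < p.length := by omega
      have hdlen : st.dropLast.length = st.length - 1 := List.length_dropLast
      have hApy : PySem.List.pyGet? st (-1) = some j := by
        conv_lhs => rw [← hdec]
        simp [pysem]
      have hA1 : pvAStep sl (p, st) ((k : Int), ')')
          = ((p.set k j).set j.toNat (k : Int), st.dropLast) := by
        simp [pvAStep, hApy, PySem.List.slice_to_neg_one]
      have hfst : (st.length : Int) - 1 = ((st.dropLast.length : Nat) : Int) := by
        rw [hdlen]; omega
      have hB1 : pvBStep sl ((st.length : Int), O, C, r) ((k : Int), ')')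
          = ((st.dropLast.length : Int), O,
             C.modify ((st.dropLast.length : Int)) [] (· ++ [(k : Int)]), r ++ [0]) := by
        simp [pvBStep, hfst]
      rw [hA1, hB1]
      -- the bucket being closed
      have hdep0lt : st.dropLast.length < st.length := by omega
      obtain ⟨hlen4, hlast4⟩ := h4 st.dropLast.length hdep0lt
      have hstj : st[st.dropLast.length]! = j := by
        rw [getElem!_pos st _ (by omega)]
        rw [hjdef, List.getLast_eq_getElem hstne]
        congr 1
      have hCd : (C.modify ((st.dropLast.length : Int)) [] (· ++ [(k : Int)])).getD
          ((st.dropLast.length : Int)) [] = C.getD ((st.dropLast.length : Int)) [] ++ [(k : Int)] :=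
        PySem.Dict.getD_modify_self C _ [] _
      have hCne : ∀ dep : Nat, dep ≠ st.dropLast.length →
          (C.modify ((st.dropLast.length : Int)) [] (· ++ [(k : Int)])).getD (dep : Int) []
          = C.getD (dep : Int) [] := by
        intro dep hne
        exact PySem.Dict.getD_modify_of_ne C [] _ (by exact_mod_cast hne)
      -- the pair list gains exactly the pair (j, k)
      have hPperm : (pvPairsB KO O (C.modify ((st.dropLast.length : Int)) [] (· ++ [(k : Int)]))).Perm
          (pvPairsB KO O C ++ [(j, (k : Int))]) := by
        simp only [pvPairsB]
        apply pv_flatMap_update_perm ((j, (k : Int)))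
          (fun dep => (O.getD (dep : Int) []).zip (C.getD (dep : Int) []))
          (fun dep => (O.getD (dep : Int) []).zip
            ((C.modify ((st.dropLast.length : Int)) [] (· ++ [(k : Int)])).getD (dep : Int) []))
          (List.range KO) st.dropLast.length List.nodup_range
          (List.mem_range.mpr (by omega))
        · intro a _ hne
          rw [hCne a hne]
        · rw [hCd]
          exact pv_zip_snoc _ _ _ _ hlen4.symm (by rw [hlast4, hstj])
      have hjnotpos : j ∉ pvPos (pvPairsB KO O C) := by
        intro hx
        obtain ⟨oc, hoc, hcase⟩ := pv_exists_of_mem_pvPos hx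
        have := h8 oc hoc
        rcases hcase with h | h
        · exact this.1 (h ▸ hjmem)
        · exact this.2 (h ▸ hjmem)
      have hknotpos : ((k : Int)) ∉ pvPos (pvPairsB KO O C) := by
        intro hx
        have := hposlt _ hx
        omega
      have hposperm : (pvPos (pvPairsB KO O (C.modify ((st.dropLast.length : Int)) [] (· ++ [(k : Int)])))).Perm
          (pvPos (pvPairsB KO O C) ++ [j, (k : Int)]) := by
        have h1 := List.Perm.flatMap_right (fun oc : Int × Int => [oc.1, oc.2]) hPperm
        simpa [pvPos, List.flatMap_append] using h1
      have hnod' : (pvPos (pvPairsB KO O (C.modify ((st.dropLast.length : Int)) [] (· ++ [(k : Int)])))).Nodup := by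
        rw [hposperm.nodup_iff]
        rw [List.nodup_append]
        refine ⟨h7, by simp; omega, ?_⟩
        intro x hx y hy
        rcases List.mem_cons.mp hy with he | he2
        · rw [he]; intro heq; exact hjnotpos (heq ▸ hx)
        · rcases List.mem_cons.mp he2 with he | he3
          · rw [he]; intro heq; exact hknotpos (heq ▸ hx)
          · simp at he3
      have hPmem : ∀ oc : Int × Int,
          oc ∈ pvPairsB KO O (C.modify ((st.dropLast.length : Int)) [] (· ++ [(k : Int)]))
          ↔ oc ∈ pvPairsB KO O C ∨ oc = (j, (k : Int)) := by
        intro oc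
        rw [hPperm.mem_iff]
        simp
      have hjk' : (j, (k : Int)) ∈ pvPairsB KO O (C.modify ((st.dropLast.length : Int)) [] (· ++ [(k : Int)])) :=
        (hPmem _).mpr (Or.inr rfl)
      apply ih (k + 1) KO ((p.set k j).set j.toNat (k : Int)) st.dropLast (r ++ [0]) O
        (C.modify ((st.dropLast.length : Int)) [] (· ++ [(k : Int)]))
      · simpa using (by omega : p.length = k + 1 + l.length)
      · simp [hrlen]
      · exact hkeys
      · omega
      · -- h4 for the shorter stack
        intro dep hdep
        rw [hCne dep (by omega)]
        obtain ⟨ha, hb⟩ := h4 dep (by omega)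
        refine ⟨ha, ?_⟩
        rw [hb]
        congr 1
        rw [getElem!_pos st dep (by omega), getElem!_pos st.dropLast dep (by omega),
          List.getElem_dropLast]
      · -- h5
        intro dep hdep
        by_cases hde : dep = st.dropLast.length
        · subst hde
          rw [hCd]
          simp only [List.length_append, List.length_cons, List.length_nil]
          omega
        · rw [hCne dep hde]
          exact h5 dep (by omega)
      · exact hsort.sublist (List.dropLast_sublist st)
      · intro j' hj'
        have := hstack j' (List.mem_of_mem_dropLast hj')
        constructor
        · exact this.1
        · omega
      · -- h6
        intro oc hoc
        rcases (hPmem oc).mp hoc with h | h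
        · have := h6 oc h
          refine ⟨this.1, this.2.1, by omega⟩
        · subst h
          refine ⟨hj0, by omega, by omega⟩
      · exact hnod'
      · -- h8
        intro oc hoc
        have hjnotdl : j ∉ st.dropLast := by
          intro hmem
          rw [← hdec] at hsort
          have := (List.pairwise_append.mp hsort).2.2 j hmem j (by simp)
          omega
        rcases (hPmem oc).mp hoc with h | h
        · have := h8 oc h
          exact ⟨fun hm => this.1 (List.mem_of_mem_dropLast hm),
            fun hm => this.2 (List.mem_of_mem_dropLast hm)⟩
        · subst h
          refine ⟨hjnotdl, ?_⟩
          intro hm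
          have := hstack _ (List.mem_of_mem_dropLast hm)
          omega
      · -- balance
        intro n
        have := hbal (n + 1)
        simp [List.take_succ_cons] at this
        omega
      · -- pointwise invariant
        intro m hm
        simp only [List.length_set] at hm
        by_cases hmk : m = k
        · subst hmk
          rw [pv_getElem!_set_ne _ _ _ _ (by omega), pv_getElem!_set_self _ _ _ hkp]
          rw [pvPartner_snd_of_mem hnod' hjk' (by omega)]
          simp
        · by_cases hmj : m = j.toNat
          · subst hmj
            rw [pv_getElem!_set_self (p.set k j) j.toNat ((k : Nat) : Int) (by simpa using hjp)]
            have : ((j.toNat : Nat) : Int) = j := hjt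
            rw [this, pvPartner_fst_of_mem hnod' hjk']
            simp
          · rw [pv_getElem!_set_ne _ _ _ _ (by omega), pv_getElem!_set_ne _ _ _ _ (by omega)]
            have hmj' : (m : Int) ≠ j := by omega
            have hmk' : (m : Int) ≠ (k : Int) := by exact_mod_cast hmk
            have hpeq : pvPartner (pvPairsB KO O (C.modify ((st.dropLast.length : Int)) [] (· ++ [(k : Int)]))) (m : Int)
                = pvPartner (pvPairsB KO O C) (m : Int) := by
              by_cases hpos : (m : Int) ∈ pvPos (pvPairsB KO O C)
              · obtain ⟨oc, hoc, hcase⟩ := pv_exists_of_mem_pvPos hpos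
                have hoc' := (hPmem oc).mpr (Or.inl hoc)
                have hne12 : oc.1 ≠ oc.2 := by have := h6 oc hoc; omega
                rcases hcase with h | h
                · rw [h, pvPartner_fst_of_mem hnod' hoc', pvPartner_fst_of_mem h7 hoc]
                · rw [h, pvPartner_snd_of_mem hnod' hoc' hne12,
                    pvPartner_snd_of_mem h7 hoc hne12]
              · have hpos' : (m : Int) ∉ pvPos (pvPairsB KO O (C.modify ((st.dropLast.length : Int)) [] (· ++ [(k : Int)]))) := by
                  intro hx
                  have := (hposperm.mem_iff).mp hx
                  rcases List.mem_append.mp this with h | h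
                  · exact hpos h
                  · simp at h
                    rcases h with h | h
                    · exact hmj' h
                    · exact hmk' (by exact_mod_cast h)
                rw [pvPartner_eq_none hpos, pvPartner_eq_none hpos']
            rw [hpeq]
            have hD : (if m < k + 1 then (r ++ [0])[m]! else 0) = (if m < k then r[m]! else 0) := by
              by_cases hlt : m < k
              · rw [if_pos (by omega), if_pos hlt]
                exact pv_getElem!_append_lt r [0] m (by omega)
              · rw [if_neg (by omega), if_neg hlt]
            rw [hD]
            exact h10 m (by omega)
    · by_cases hc2 : c = '('
      · -- current character is '('
        subst hc2
        have hA1 : pvAStep sl (p, st) ((k : Int), '(') = (p, st ++ [(k : Int)]) := by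
          simp [pvAStep]
        have hB1 : pvBStep sl ((st.length : Int), O, C, r) ((k : Int), '(')
            = (((st ++ [(k : Int)]).length : Int), O.modify ((st.length : Int)) [] (· ++ [(k : Int)]), C, r ++ [0]) := by
          simp [pvBStep]
        rw [hA1, hB1]
        have hOd : (O.modify ((st.length : Int)) [] (· ++ [(k : Int)])).getD ((st.length : Int)) []
            = O.getD ((st.length : Int)) [] ++ [(k : Int)] := PySem.Dict.getD_modify_self O _ [] _
        have hOne : ∀ dep : Nat, dep ≠ st.length →
            (O.modify ((st.length : Int)) [] (· ++ [(k : Int)])).getD (dep : Int) [] = O.getD (dep : Int) [] := by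
          intro dep hne
          exact PySem.Dict.getD_modify_of_ne O [] _ (by exact_mod_cast hne)
        have hstack' : ∀ j' ∈ st ++ [(k : Int)], 0 ≤ j' ∧ j' < ((k + 1 : Nat) : Int) := by
          intro j' hj'
          rcases List.mem_append.mp hj' with h | h
          · have := hstack j' h; constructor
            · exact this.1
            · omega
          · simp at h; subst h
            constructor
            · omega
            · omega
        have hsort' : (st ++ [(k : Int)]).Pairwise (· < ·) := by
          rw [List.pairwise_append]
          refine ⟨hsort, by simp, ?_⟩
          intro a ha b hb
          simp at hb; subst hb
          exact (hstack a ha).2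
        have hbal' : ∀ n : Nat, (l.take n).count ')' ≤ (st ++ [(k : Int)]).length + (l.take n).count '(' := by
          intro n
          have := hbal (n + 1)
          simp [List.take_succ_cons] at this
          simp only [List.length_append, List.length_cons, List.length_nil]
          omega
        by_cases hKlt : st.length < KO
        · -- the depth bucket already exists: keys unchanged, pair list unchanged
          have hcon : O.contains ((st.length : Int)) = true := by
            rw [PySem.Dict.contains_eq_decide_mem_keys, hkeys]
            simp only [List.mem_map, List.mem_range, decide_eq_true_eq]
            exact ⟨st.length, hKlt, rfl⟩
          have hkeys' : (O.modify ((st.length : Int)) [] (· ++ [(k : Int)])).keys = O.keys := by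
            rw [PySem.Dict.keys_modify]
            exact PySem.Dict.keys_insert_of_contains O _ hcon
          have hPeq : pvPairsB KO (O.modify ((st.length : Int)) [] (· ++ [(k : Int)])) C = pvPairsB KO O C := by
            apply List.flatMap_congr
            intro dep hdep
            by_cases hdd : dep = st.length
            · subst hdd
              rw [hOd]
              exact pv_zip_append_right _ _ _ (by rw [h5 st.length le_rfl])
            · rw [hOne dep hdd]
          apply ih (k + 1) KO p (st ++ [(k : Int)]) (r ++ [0])
            (O.modify ((st.length : Int)) [] (· ++ [(k : Int)])) C
          · simpa using (by omega : p.length = k + 1 + l.length)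
          · simp [hrlen]
          · rw [hkeys', hkeys]
          · simp; omega
          · intro dep hdep
            simp only [List.length_append, List.length_cons, List.length_nil] at hdep
            by_cases hdd : dep = st.length
            · subst hdd
              rw [hOd]
              constructor
              · simp only [List.length_append, List.length_cons, List.length_nil]
                have := h5 st.length le_rfl
                omega
              · rw [List.getLast?_concat]
                rw [pv_getElem!_append_self st ((k : Int))]
            · rw [hOne dep hdd]
              obtain ⟨ha, hb⟩ := h4 dep (by omega)
              refine ⟨ha, ?_⟩
              rw [hb]
              congr 1
              exact (pv_getElem!_append_lt st [(k : Int)] dep (by omega)).symm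
          · intro dep hdep
            simp only [List.length_append, List.length_cons, List.length_nil] at hdep
            rw [hOne dep (by omega)]
            exact h5 dep (by omega)
          · exact hsort'
          · exact hstack'
          · intro oc hoc
            rw [hPeq] at hoc
            have := h6 oc hoc
            refine ⟨this.1, this.2.1, by omega⟩
          · rw [hPeq]; exact h7
          · intro oc hoc
            rw [hPeq] at hoc
            have h1 := h8 oc hoc
            have h2 := h6 oc hoc
            constructor
            · intro hm
              rcases List.mem_append.mp hm with h | h
              · exact h1.1 h
              · simp at h; omega
            · intro hm
              rcases List.mem_append.mp hm with h | h
              · exact h1.2 h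
              · simp at h; omega
          · exact hbal'
          · intro m hm
            rw [hPeq]
            by_cases hmk : m < k
            · have := h10 m (by omega)
              rw [if_pos hmk] at this
              rw [if_pos (by omega), pv_getElem!_append_lt r [0] m (by omega)]
              exact this
            · by_cases hmk2 : m = k
              · subst hmk2
                have := h10 m (by omega)
                rw [if_neg (by omega)] at this
                rw [if_pos (by omega)]
                rw [show m = r.length by omega] at this ⊢
                rw [pv_getElem!_append_self r 0]
                exact this
              · have := h10 m (by omega)
                rw [if_neg (by omega)] at this
                rw [if_neg (by omega)]
                exact this
        · -- a brand new depth bucket: keys grow by one, pair list unchanged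
          have hKeq : st.length = KO := by omega
          have hcon : O.contains ((st.length : Int)) = false := by
            rw [PySem.Dict.contains_eq_decide_mem_keys, hkeys]
            simp only [List.mem_map, List.mem_range]
            apply decide_eq_false
            rintro ⟨a, ha, he⟩
            have : a = st.length := by exact_mod_cast he
            omega
          have hkeys' : (O.modify ((st.length : Int)) [] (· ++ [(k : Int)])).keys
              = (List.range (KO + 1)).map (fun n : Nat => (n : Int)) := by
            rw [PySem.Dict.keys_modify]
            rw [PySem.Dict.keys_insert_of_not_contains O _ hcon, hkeys]
            rw [List.range_succ, List.map_append]
            simp [hKeq]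
          have hOKO : O.getD ((st.length : Int)) [] = [] :=
            PySem.Dict.getD_of_not_contains O [] hcon
          have hCKO : C.getD ((st.length : Int)) [] = [] := by
            have := h5 st.length le_rfl
            rw [hOKO] at this
            simpa using (List.length_eq_zero_iff.mp this.symm)
          have hPeq : pvPairsB (KO + 1) (O.modify ((st.length : Int)) [] (· ++ [(k : Int)])) C
              = pvPairsB KO O C := by
            show (List.range (KO + 1)).flatMap _ = _
            rw [List.range_succ, List.flatMap_append]
            have htail : (O.modify ((st.length : Int)) [] (· ++ [(k : Int)])).getD ((KO : Nat) : Int) [] = [(k : Int)] := by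
              rw [← hKeq, hOd, hOKO]
              simp
            have h0 : (List.flatMap (fun dep => ((O.modify ((st.length : Int)) [] (· ++ [(k : Int)])).getD ((dep : Nat) : Int) []).zip (C.getD ((dep : Nat) : Int) [])) [KO]) = [] := by
              simp only [List.flatMap_cons, List.flatMap_nil, List.append_nil]
              rw [htail, ← hKeq, hCKO]
              simp
            rw [h0, List.append_nil]
            apply List.flatMap_congr
            intro dep hdep
            rw [hOne dep (by simp at hdep; omega)]
          apply ih (k + 1) (KO + 1) p (st ++ [(k : Int)]) (r ++ [0])
            (O.modify ((st.length : Int)) [] (· ++ [(k : Int)])) C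
          · simpa using (by omega : p.length = k + 1 + l.length)
          · simp [hrlen]
          · exact hkeys'
          · simp; omega
          · intro dep hdep
            simp only [List.length_append, List.length_cons, List.length_nil] at hdep
            by_cases hdd : dep = st.length
            · subst hdd
              rw [hOd, hOKO, hCKO]
              refine ⟨by simp, ?_⟩
              simp only [List.nil_append]
              rw [pv_getElem!_append_self st ((k : Int))]
              rfl
            · rw [hOne dep hdd]
              obtain ⟨ha, hb⟩ := h4 dep (by omega)
              refine ⟨ha, ?_⟩
              rw [hb]
              congr 1
              exact (pv_getElem!_append_lt st [(k : Int)] dep (by omega)).symm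
          · intro dep hdep
            simp only [List.length_append, List.length_cons, List.length_nil] at hdep
            rw [hOne dep (by omega)]
            exact h5 dep (by omega)
          · exact hsort'
          · exact hstack'
          · intro oc hoc
            rw [hPeq] at hoc
            have := h6 oc hoc
            refine ⟨this.1, this.2.1, by omega⟩
          · rw [hPeq]; exact h7
          · intro oc hoc
            rw [hPeq] at hoc
            have h1 := h8 oc hoc
            have h2 := h6 oc hoc
            constructor
            · intro hm
              rcases List.mem_append.mp hm with h | h
              · exact h1.1 h
              · simp at h; omega
            · intro hm
              rcases List.mem_append.mp hm with h | h
              · exact h1.2 h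
              · simp at h; omega
          · exact hbal'
          · intro m hm
            rw [hPeq]
            by_cases hmk : m < k
            · have := h10 m (by omega)
              rw [if_pos hmk] at this
              rw [if_pos (by omega), pv_getElem!_append_lt r [0] m (by omega)]
              exact this
            · by_cases hmk2 : m = k
              · subst hmk2
                have := h10 m (by omega)
                rw [if_neg (by omega)] at this
                rw [if_pos (by omega)]
                rw [show m = r.length by omega] at this ⊢
                rw [pv_getElem!_append_self r 0]
                exact this
              · have := h10 m (by omega)
                rw [if_neg (by omega)] at this
                rw [if_neg (by omega)]
                exact this
      · -- any other character
        have hA1 : pvAStep sl (p, st) ((k : Int), c)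
            = (p.set k (if sl = "-1" then (-1 : Int) else (k : Int)), st) := by
          simp [pvAStep, hc1, hc2]
        have hB1 : pvBStep sl ((st.length : Int), O, C, r) ((k : Int), c)
            = ((st.length : Int), O, C, r ++ [if sl = "-1" then (-1 : Int) else (k : Int)]) := by
          simp [pvBStep, hc1, hc2]
        rw [hA1, hB1]
        apply ih (k + 1) KO (p.set k (if sl = "-1" then (-1 : Int) else (k : Int))) st
          (r ++ [if sl = "-1" then (-1 : Int) else (k : Int)]) O C
        · simpa using (by omega : p.length = k + 1 + l.length)
        · simp [hrlen]
        · exact hkeys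
        · exact hKO
        · exact h4
        · exact h5
        · exact hsort
        · intro j' hj'
          have := hstack j' hj'
          exact ⟨this.1, by omega⟩
        · intro oc hoc
          have := h6 oc hoc
          refine ⟨this.1, this.2.1, by omega⟩
        · exact h7
        · exact h8
        · intro n
          have := hbal (n + 1)
          simp [List.take_succ_cons, hc1, hc2] at this
          omega
        · intro m hm
          simp only [List.length_set] at hm
          by_cases hmk : m = k
          · subst hmk
            rw [pv_getElem!_set_self p m _ (by omega)]
            have hknot : ((m : Nat) : Int) ∉ pvPos (pvPairsB KO O C) := by
              intro hx
              have := hposlt _ hx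
              omega
            rw [pvPartner_eq_none hknot]
            simp only [Option.getD_none]
            rw [if_pos (show m < m + 1 by omega)]
            rw [show (m : Nat) = r.length by omega]
            rw [pv_getElem!_append_self r _]
          · rw [pv_getElem!_set_ne _ _ _ _ (by omega)]
            have hD : (if m < k + 1 then (r ++ [if sl = "-1" then (-1 : Int) else (k : Int)])[m]! else 0)
                = (if m < k then r[m]! else 0) := by
              by_cases hlt : m < k
              · rw [if_pos (by omega), if_pos hlt]
                exact pv_getElem!_append_lt r _ m (by omega)
              · rw [if_neg (by omega), if_neg hlt]
            rw [hD]
            exact h10 m (by omega)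

-- ===== VERDICT (by name: the statements are the Claim_ definitions above) =====
theorem phrantheses_to_pairing_list_spec : Claim_equal_phrantheses_to_pairing_list := by
  intro str sl _hdom hpre
  unfold Spec_phrantheses_to_pairing_list
  simp only [phrantheses_to_pairing_list, phrantheses_to_pairing_list_alt]
  have hbal : ∀ n : Nat, ((str.toList.take n).count ')')
      ≤ ([] : List Int).length + (str.toList.take n).count '(' := by
    intro n
    by_cases hn : n ≤ str.toList.length
    · simpa using hpre n (by omega)
    · have h1 := hpre str.toList.length (by omega)
      rw [List.take_length] at h1
      rw [List.take_of_length_le (by omega)]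
      simpa using h1
  have H := pv_main sl str.toList 0 0 (List.replicate str.toList.length 0) [] []
      PySem.Dict.empty PySem.Dict.empty
      (by simp) rfl
      (by simp)
      (by simp)
      (by intro dep h; simp at h)
      (by intro dep _; rfl)
      List.Pairwise.nil
      (by intro j hj; simp at hj)
      (by intro oc hoc; simp [pvPairsB] at hoc)
      (by simp [pvPairsB, pvPos])
      (by intro oc hoc; simp [pvPairsB] at hoc)
      (by simpa using hbal)
      (by
        intro m hm
        simp only [List.length_replicate] at hm
        rw [getElem!_pos _ _ (by simpa using hm)]
        simp [pvPairsB, pvPartner, List.findSome?])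
  obtain ⟨KO', hkeys', heq⟩ := H
  simp only [List.length_nil, Nat.cast_zero] at hkeys' heq
  rw [heq]
  have hnd : ((List.foldl (pvBStep sl) (0, PySem.Dict.empty, PySem.Dict.empty, [])
      (PySem.List.enumerate str.toList 0)).2.1).keys.Nodup := by
    rw [hkeys']
    exact List.Nodup.map (fun a b h => by exact_mod_cast h) List.nodup_range
  rw [PySem.Dict.items_eq_map_keys _ hnd []]
  rw [hkeys', List.map_map, ← List.foldl_flatMap, List.flatMap_map]
  rfl
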